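-- pv_equiv track=rewrite | github.com/jane516/algorithm | 옥상정원꾸미기_6198.py | bench_marking
-- ===== SOURCE A (Python) =====
-- def bench_marking(N, buildings):
--     result = [0] * N
--     stack = []
--     for i in range(N):
--         while stack and buildings[stack[-1]] <= buildings[i]:
--             stack.pop()
--         result[i] = len(stack)
--         stack.append(i)
--     return sum(result)
-- ===== SOURCE B (Python) =====
-- def bench_marking(N, buildings):
--     # Direct definition instead of a stack: building i sees exactly the
--     # left-to-right records of the reversed prefix, i.e. every j < i whose
--     # height exceeds everything in buildings[j+1..i]; count them with a
--     # backward running-max scan per building.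
--     total = 0
--     for i in range(N):
--         m = buildings[i]
--         for j in reversed(range(i)):
--             if buildings[j] > m:
--                 total += 1
--                 m = buildings[j]
--     return total
-- ===== Notes on version B (the rewrite author's own statement) =====
-- stated objective: alternative
-- what changed: B replaces A's monotonic stack and result array by the direct definition: for each building a backward running-max scan over its prefix counts the left-to-right records it can see, so no stack and no auxiliary array exist in B.
-- outside the precondition, e.g. on bench_marking(1, []): A returns 0, B raises IndexError
import Mathlib
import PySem

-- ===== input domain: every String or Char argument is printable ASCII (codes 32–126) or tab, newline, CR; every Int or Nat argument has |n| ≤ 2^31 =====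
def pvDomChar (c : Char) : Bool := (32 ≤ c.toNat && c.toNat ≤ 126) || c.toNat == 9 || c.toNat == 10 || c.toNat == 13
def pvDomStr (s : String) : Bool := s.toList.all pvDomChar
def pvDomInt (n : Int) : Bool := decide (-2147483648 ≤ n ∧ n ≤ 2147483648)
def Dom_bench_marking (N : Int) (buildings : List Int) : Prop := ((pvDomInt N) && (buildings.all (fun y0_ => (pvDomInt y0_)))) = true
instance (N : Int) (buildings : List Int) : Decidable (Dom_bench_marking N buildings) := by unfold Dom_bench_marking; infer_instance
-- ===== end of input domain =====

-- B drops A's monotonic stack and result array entirely: for each building it counts the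
-- visible left records directly with a backward running-max scan (objective: alternative).

-- ===== PORT A =====
-- 'while stack and buildings[stack[-1]] <= buildings[i]: stack.pop()'  (list head = Python stack top)
def popA (buildings : List Int) (h : Int) : List Int → List Int
  | [] => []
  | j :: rest =>
    if PySem.List.pyGetD buildings j 0 ≤ h then popA buildings h rest else j :: rest

-- one iteration of A's for-loop: pop, record len(stack) at result[i], push i
def stepA (buildings : List Int) (st : List Int × List Int) (i : Int) : List Int × List Int :=
  let stack' := popA buildings (PySem.List.pyGetD buildings i 0) st.2
  (st.1.set i.toNat (stack'.length : Int), i :: stack')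

def bench_marking (N : Int) (buildings : List Int) : Int :=
  ((PySem.List.pyRange 0 N 1).foldl (stepA buildings) (List.replicate N.toNat 0, [])).1.sum

-- ===== PORT B =====
-- state (total, m): 'if buildings[j] > m: total += 1; m = buildings[j]'
def innerB (buildings : List Int) (st : Int × Int) (j : Int) : Int × Int :=
  if st.2 < PySem.List.pyGetD buildings j 0 then (st.1 + 1, PySem.List.pyGetD buildings j 0) else st

-- one iteration of B's outer loop: 'for j in reversed(range(i)): …' starting from m = buildings[i]
def stepB (buildings : List Int) (total : Int) (i : Int) : Int :=
  (((PySem.List.pyRange 0 i 1).reverse).foldl (innerB buildings) (total, PySem.List.pyGetD buildings i 0)).1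

def bench_marking_alt (N : Int) (buildings : List Int) : Int :=
  (PySem.List.pyRange 0 N 1).foldl (stepB buildings) 0

-- ===== PRECONDITION & SPEC =====
-- Pre_ excludes N > len(buildings): there Python A raises IndexError, except that for N = 1
-- it accidentally returns 0 without ever indexing buildings (the while test short-circuits
-- on the empty stack), an artefact of A's loop structure; B reads buildings[i] and raises.
def Pre_bench_marking (N : Int) (buildings : List Int) : Prop := N ≤ (buildings.length : Int)
instance (N : Int) (buildings : List Int) : Decidable (Pre_bench_marking N buildings) := by
  unfold Pre_bench_marking; infer_instance
def pvWitness_bench_marking : Int × List Int := (3, [2, 1, 3])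

def Spec_bench_marking (N : Int) (buildings : List Int) (out : Int) : Prop := out = bench_marking_alt N buildings
instance (N : Int) (buildings : List Int) (out : Int) : Decidable (Spec_bench_marking N buildings out) := by unfold Spec_bench_marking; infer_instance

-- ===== CLAIM (what is proved, stated in full; the proofs are below) =====
def Claim_equal_bench_marking : Prop := ∀ (N : Int) (buildings : List Int), Dom_bench_marking N buildings → Pre_bench_marking N buildings → Spec_bench_marking N buildings (bench_marking N buildings)

-- ===== LEMMAS AND PROOFS =====

-- popA only discards elements; it is the dropWhile of 'height ≤ h', hence a sublist
lemma popA_sublist (buildings : List Int) (h : Int) :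
    ∀ s : List Int, (popA buildings h s).Sublist s := by
  intro s
  induction s with
  | nil => simp [popA]
  | cons j rest ih =>
    by_cases hc : PySem.List.pyGetD buildings j 0 ≤ h
    · simpa [popA, hc] using ih.trans (List.sublist_cons_self j rest)
    · simp [popA, hc]

-- a predicate false on every popped element is counted identically before and after popA
lemma countP_popA (buildings : List Int) (h : Int) (p : Int → Bool)
    (hp : ∀ j, PySem.List.pyGetD buildings j 0 ≤ h → p j = false) :
    ∀ s : List Int, (popA buildings h s).countP p = s.countP p := by
  intro s
  induction s with
  | nil => simp [popA]
  | cons j rest ih =>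
    by_cases hc : PySem.List.pyGetD buildings j 0 ≤ h
    · simp [popA, hc, ih, hp j hc]
    · simp [popA, hc]

-- on a height-sorted stack every survivor of popA is strictly taller than h
lemma popA_forall (buildings : List Int) (h : Int) :
    ∀ s : List Int,
      s.Pairwise (fun x y => PySem.List.pyGetD buildings x 0 < PySem.List.pyGetD buildings y 0) →
      ∀ j ∈ popA buildings h s, h < PySem.List.pyGetD buildings j 0 := by
  intro s
  induction s with
  | nil => simp [popA]
  | cons j rest ih =>
    intro hpw k hk
    rcases List.pairwise_cons.1 hpw with ⟨hj, hrest⟩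
    by_cases hc : PySem.List.pyGetD buildings j 0 ≤ h
    · exact ih hrest k (by simpa [popA, hc] using hk)
    · simp only [popA, hc, if_false] at hk
      rcases List.mem_cons.1 hk with hk | hk
      · subst hk; omega
      · have := hj k hk; omega

-- on a height-sorted stack, the elements taller than h' are exactly the survivors of popA h
-- whenever h' ≤ h (both counts equal the survivor count)
lemma countP_eq_length_popA (buildings : List Int) (h h' : Int) (hle : h' ≤ h)
    (s : List Int)
    (hpw : s.Pairwise (fun x y => PySem.List.pyGetD buildings x 0 < PySem.List.pyGetD buildings y 0)) :
    s.countP (fun j => decide (h < PySem.List.pyGetD buildings j 0))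
      = (popA buildings h s).length ∧
    (popA buildings h s).countP (fun j => decide (h' < PySem.List.pyGetD buildings j 0))
      = (popA buildings h s).length := by
  have hall := popA_forall buildings h s hpw
  constructor
  · rw [← countP_popA buildings h _ (by intro j hj; simp; omega) s]
    exact List.countP_eq_length.2 fun j hj => by simpa using hall j hj
  · exact List.countP_eq_length.2 fun j hj => by have := hall j hj; simp; omega

-- the main invariant after processing indices 0..n-1:
-- (a) A's stack is strictly height-sorted, (b) B's backward scan over the prefix, from any
-- start height h, counts exactly the stack elements taller than h, (c) A's result array is
-- the processed prefix w followed by zeros and w sums to B's running total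
lemma invariant (buildings : List Int) (N : Int) :
    ∀ (n : Nat), n ≤ N.toNat →
      (((PySem.List.pyRange 0 (n : Int) 1).foldl (stepA buildings)
          (List.replicate N.toNat 0, [])).2.Pairwise
            (fun x y => PySem.List.pyGetD buildings x 0 < PySem.List.pyGetD buildings y 0))
      ∧ (∀ h t : Int,
          (((PySem.List.pyRange 0 (n : Int) 1).reverse).foldl (innerB buildings) (t, h)).1
            = t + ((((PySem.List.pyRange 0 (n : Int) 1).foldl (stepA buildings)
                (List.replicate N.toNat 0, [])).2.countP
                  (fun j => decide (h < PySem.List.pyGetD buildings j 0)) : Nat) : Int))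
      ∧ (∃ w : List Int,
          w.length = n ∧
          ((PySem.List.pyRange 0 (n : Int) 1).foldl (stepA buildings)
              (List.replicate N.toNat 0, [])).1
            = w ++ List.replicate (N.toNat - n) 0 ∧
          w.sum = (PySem.List.pyRange 0 (n : Int) 1).foldl (stepB buildings) 0) := by
  intro n
  induction n with
  | zero =>
    intro _
    refine ⟨by simp [PySem.List.pyRange_one_eq_nil], ?_, ⟨[], by simp, by simp, by simp [PySem.List.pyRange_one_eq_nil]⟩⟩
    intro h t
    simp [PySem.List.pyRange_one_eq_nil]
  | succ n ih =>
    intro hle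
    have hn : n ≤ N.toNat := Nat.le_of_succ_le hle
    obtain ⟨hpw, hscan, w, hwlen, hres, hsum⟩ := ih hn
    have hrange : PySem.List.pyRange 0 ((n : Nat) + 1 : Int) 1
        = PySem.List.pyRange 0 (n : Int) 1 ++ [(n : Int)] :=
      PySem.List.pyRange_one_succ_right (by exact_mod_cast Nat.zero_le n)
    have hcast : (((n + 1 : Nat)) : Int) = ((n : Nat) : Int) + 1 := by push_cast; ring
    set SA := (PySem.List.pyRange 0 (n : Int) 1).foldl (stepA buildings)
        (List.replicate N.toNat 0, []) with hSA
    set bn := PySem.List.pyGetD buildings (n : Int) 0 with hbn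
    have hfoldA : (PySem.List.pyRange 0 ((n + 1 : Nat) : Int) 1).foldl (stepA buildings)
        (List.replicate N.toNat 0, []) = stepA buildings SA (n : Int) := by
      rw [hcast, hrange, List.foldl_append]; rfl
    have hrev : (PySem.List.pyRange 0 ((n + 1 : Nat) : Int) 1).reverse
        = (n : Int) :: (PySem.List.pyRange 0 (n : Int) 1).reverse := by
      rw [hcast, hrange, List.reverse_append]; rfl
    have hcnt := countP_eq_length_popA buildings bn
    have hpw' : (popA buildings bn SA.2).Pairwise
        (fun x y => PySem.List.pyGetD buildings x 0 < PySem.List.pyGetD buildings y 0) :=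
      hpw.sublist (popA_sublist buildings bn SA.2)
    refine ⟨?_, ?_, ?_⟩
    · -- (a) pairwise
      rw [hfoldA]
      simp only [stepA]
      exact List.pairwise_cons.2 ⟨popA_forall buildings bn SA.2 hpw, hpw'⟩
    · -- (b) backward scan
      intro h t
      rw [hrev, List.foldl_cons, hfoldA]
      simp only [stepA]
      by_cases hc : h < bn
      · have hstep : innerB buildings (t, h) (n : Int) = (t + 1, bn) := by
          simp [innerB, ← hbn, hc]
        rw [hstep, hscan bn (t + 1)]
        have h1 := (hcnt bn le_rfl SA.2 hpw).1
        have h2 := (hcnt h (le_of_lt hc) SA.2 hpw).2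
        rw [h1, List.countP_cons]
        simp only [← hbn, hc, decide_true]
        rw [h2]
        push_cast; ring
      · have hstep : innerB buildings (t, h) (n : Int) = (t, h) := by
          simp [innerB, ← hbn, hc]
        rw [hstep, hscan h t]
        rw [List.countP_cons]
        simp only [← hbn, hc, decide_false]
        rw [countP_popA buildings bn _ (by intro j hj; simp; omega) SA.2]
        simp
    · -- (c) result array and totals
      obtain ⟨r, hr⟩ : ∃ r, List.replicate (N.toNat - n) (0 : Int) = 0 :: r ∧
          r = List.replicate (N.toNat - (n + 1)) (0 : Int) := by
        refine ⟨List.replicate (N.toNat - (n + 1)) 0, ?_, rfl⟩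
        rw [← List.replicate_succ]
        congr 1
        omega
      refine ⟨w ++ [((popA buildings bn SA.2).length : Int)], by simp [hwlen], ?_, ?_⟩
      · rw [hfoldA]
        simp only [stepA]
        rw [hres, hr.1, Int.toNat_natCast]
        rw [show (w ++ 0 :: r).set n (((popA buildings bn SA.2).length : Int))
              = w ++ [((popA buildings bn SA.2).length : Int)] ++ r from ?_]
        · rw [hr.2]
        · rw [List.set_append_right _ _ (by omega)]
          simp [hwlen]
      · have hfoldB : (PySem.List.pyRange 0 ((n + 1 : Nat) : Int) 1).foldl (stepB buildings) 0
            = stepB buildings ((PySem.List.pyRange 0 (n : Int) 1).foldl (stepB buildings) 0)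
                (n : Int) := by
          rw [hcast, hrange, List.foldl_append]; rfl
        rw [hfoldB]
        simp only [stepB, ← hbn]
        rw [hscan bn _]
        rw [(hcnt bn le_rfl SA.2 hpw).1]
        simp [hsum]

-- ===== VERDICT (by name: the statement is the Claim_ definition above) =====
theorem bench_marking_spec : Claim_equal_bench_marking := by
  intro N buildings _ _
  unfold Spec_bench_marking bench_marking bench_marking_alt
  by_cases hN : 0 ≤ N
  · have hNn : ((N.toNat : Nat) : Int) = N := Int.toNat_of_nonneg hN
    obtain ⟨-, -, w, hwlen, hres, hsum⟩ := invariant buildings N N.toNat le_rfl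
    rw [hNn] at hres hsum
    rw [hres, ← hsum]
    simp
  · have : PySem.List.pyRange 0 N 1 = [] := PySem.List.pyRange_one_eq_nil (by omega)
    have hN0 : N.toNat = 0 := by omega
    simp [this, hN0]
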